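-- pv_equiv track=rewrite | github.com/zizoelshimy/compression-project- | Flask-Compression-webApp/file_analysis.py | check_long_runs
-- ===== SOURCE A (Python) =====
-- def check_long_runs(text, min_run_length=3):
--
--     if not text or len(text) < min_run_length:
--         return None, 0
--
--     current_char = None
--     current_run_length = 0
--     longest_run_char = None
--     longest_run_length = 0
--
--     for char in text:
--         if char == current_char:
--             current_run_length += 1
--         else:
--             if current_run_length >= min_run_length and current_run_length> longest_run_length:
--               longest_run_length = current_run_length
--               longest_run_char = current_char
--             current_char = char
--             current_run_length = 1
--
--
--     if current_run_length >= min_run_length and current_run_length> longest_run_length: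
--         longest_run_length = current_run_length
--         longest_run_char = current_char
--     if longest_run_char is None:
--         return None, 0
--     else:
--         return longest_run_char, longest_run_length
-- ===== SOURCE B (Python) =====
-- def check_long_runs(text, min_run_length=3):
--     # Decompose into runs first, then select the first maximal qualifying run.
--     runs = []
--     i, n = 0, len(text)
--     while i < n:
--         j = i
--         while j < n and text[j] == text[i]:
--             j += 1
--         runs.append((text[i], j - i))
--         i = j
--     candidates = [(c, l) for (c, l) in runs if l >= min_run_length]
--     if not candidates:
--         return None, 0
--     return max(candidates, key=lambda cl: cl[1])
-- ===== Notes on version B (the rewrite author's own statement) =====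
-- stated objective: alternative
-- what changed: B replaces A's single-pass best-so-far state machine (current/longest char and length with inline flushes) by a two-phase decomposition: first build the list of (char, run-length) runs with nested index loops, then pick the first maximal qualifying run with max(key=...); the empty/too-short guard disappears because such inputs yield no qualifying run.
import Mathlib
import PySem

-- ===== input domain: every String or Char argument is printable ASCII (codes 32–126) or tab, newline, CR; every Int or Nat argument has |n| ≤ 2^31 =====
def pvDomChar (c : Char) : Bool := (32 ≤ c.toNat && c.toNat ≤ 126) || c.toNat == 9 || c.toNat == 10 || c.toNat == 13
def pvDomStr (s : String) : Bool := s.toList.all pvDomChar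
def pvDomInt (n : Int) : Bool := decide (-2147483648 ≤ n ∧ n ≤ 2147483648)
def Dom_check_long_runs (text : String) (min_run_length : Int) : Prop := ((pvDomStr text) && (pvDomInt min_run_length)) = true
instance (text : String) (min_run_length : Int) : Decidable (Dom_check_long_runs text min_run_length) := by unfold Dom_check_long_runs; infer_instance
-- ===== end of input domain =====

-- B replaces A's one-pass best-so-far state machine by "build the run list, then take the
-- first maximal qualifying run" (alternative decomposition, same O(n) cost).

-- ===== PORT A =====
-- loop body of A's for-loop: state (current_char, current_run_length, longest_run_char, longest_run_length)
def pvStepA (min_run_length : Int) (st : Option Char × Int × Option Char × Int) (ch : Char) :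
    Option Char × Int × Option Char × Int :=
  match st with
  | (cc, cr, lc, ll) =>
    if cc == some ch then (cc, cr + 1, lc, ll)
    else if min_run_length ≤ cr ∧ ll < cr then (some ch, 1, cc, cr)
    else (some ch, 1, lc, ll)

def check_long_runs (text : String) (min_run_length : Int) : Option String × Int :=
  if text = "" ∨ (text.length : Int) < min_run_length then (none, 0)
  else
    match text.toList.foldl (pvStepA min_run_length) (none, 0, none, 0) with
    | (cc, cr, lc, ll) =>
      let fin := if min_run_length ≤ cr ∧ ll < cr then (cc, cr) else (lc, ll)
      match fin.1 with
      | none => (none, 0)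
      | some c => (some (String.mk [c]), fin.2)

-- ===== PORT B =====
-- B's nested while loops building the run list: inner while = takeWhile/dropWhile on the tail
def pvRunsB : List Char → List (String × Int)
  | [] => []
  | c :: rest =>
    (String.mk [c], 1 + ((rest.takeWhile (fun d => d == c)).length : Int)) ::
      pvRunsB (rest.dropWhile (fun d => d == c))
termination_by cs => cs.length
decreasing_by
  have := List.length_dropWhile_le (p := fun d => d == c) (l := rest)
  simp
  omega

def check_long_runs_alt (text : String) (min_run_length : Int) : Option String × Int :=
  let candidates := (pvRunsB text.toList).filter (fun p => decide (min_run_length ≤ p.2))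
  match PySem.List.max? candidates (fun p => p.2) with
  | none => (none, 0)
  | some p => (some p.1, p.2)

-- ===== PRECONDITION & SPEC =====
def Spec_check_long_runs (text : String) (min_run_length : Int) (out : Option String × Int) : Prop := out = check_long_runs_alt text min_run_length
instance (text : String) (min_run_length : Int) (out : Option String × Int) : Decidable (Spec_check_long_runs text min_run_length out) := by unfold Spec_check_long_runs; infer_instance

-- ===== CLAIM (what is proved, stated in full; the proofs are below) =====
def Claim_equal_check_long_runs : Prop := ∀ (text : String) (min_run_length : Int), Dom_check_long_runs text min_run_length → Spec_check_long_runs text min_run_length (check_long_runs text min_run_length)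

-- ===== LEMMAS AND PROOFS =====

-- carry form of the run decomposition: current char c with k occurrences already seen
def pvRunsAux (c : Char) (k : Int) : List Char → List (String × Int)
  | [] => [(String.mk [c], k)]
  | d :: ds => if d = c then pvRunsAux c (k + 1) ds else (String.mk [c], k) :: pvRunsAux d 1 ds

-- fold that keeps the first strictly greatest qualifying run (A's flush rule)
def pvBest (min_run_length : Int) (rs : List (String × Int)) (b : Option String × Int) :
    Option String × Int :=
  rs.foldl (fun b p => if min_run_length ≤ p.2 ∧ b.2 < p.2 then (some p.1, p.2) else b) b

-- A's trailing flush, with the char mapped to its 1-char string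
def pvFin (min_run_length : Int) (st : Option Char × Int × Option Char × Int) :
    Option String × Int :=
  match st with
  | (cc, cr, lc, ll) =>
    if min_run_length ≤ cr ∧ ll < cr then (cc.map (fun c => String.mk [c]), cr)
    else (lc.map (fun c => String.mk [c]), ll)

def pvUnb : Option (String × Int) → Option String × Int
  | none => (none, 0)
  | some p => (some p.1, p.2)

theorem pvL1 (min_run_length : Int) :
    ∀ (cs : List Char) (c : Char) (k : Int) (lc : Option Char) (ll : Int),
      pvFin min_run_length (cs.foldl (pvStepA min_run_length) (some c, k, lc, ll)) =
        pvBest min_run_length (pvRunsAux c k cs) (lc.map (fun c => String.mk [c]), ll) := by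
  intro cs
  induction cs with
  | nil =>
    intro c k lc ll
    by_cases h : min_run_length ≤ k ∧ ll < k <;>
      simp [pvFin, pvBest, pvRunsAux, h]
  | cons d ds ih =>
    intro c k lc ll
    by_cases h : d = c
    · subst h
      simp only [List.foldl_cons, pvStepA, pvRunsAux, beq_self_eq_true, if_pos, Option.some.injEq]
      simp [ih]
    · have hbeq : (some c == some d) = false := by
        exact beq_eq_false_iff_ne.mpr (fun hh => h (Option.some.inj hh).symm)
      simp only [List.foldl_cons, pvStepA, hbeq, Bool.false_eq_true, if_false, pvRunsAux, h]
      by_cases hc : min_run_length ≤ k ∧ ll < k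
      · simp only [if_pos hc]
        rw [ih]
        simp [pvBest, hc]
      · simp only [if_neg hc]
        rw [ih]
        simp [pvBest, hc]

theorem pvL2 :
    ∀ (cs : List Char) (c : Char) (k : Int),
      pvRunsAux c k cs =
        (String.mk [c], k + ((cs.takeWhile (fun d => d == c)).length : Int)) ::
          pvRunsB (cs.dropWhile (fun d => d == c)) := by
  intro cs
  induction cs with
  | nil => intro c k; simp [pvRunsAux, pvRunsB]
  | cons d ds ih =>
    intro c k
    by_cases h : d = c
    · subst h
      simp only [pvRunsAux, if_pos rfl, List.takeWhile_cons, List.dropWhile_cons,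
        beq_self_eq_true, if_pos]
      rw [ih]
      simp only [List.length_cons]
      congr 2
      push_cast
      omega
    · have hbeq : (d == c) = false := by simp [h]
      simp [pvRunsAux, h, List.takeWhile_cons, List.dropWhile_cons, hbeq, ih, pvRunsB]

theorem pvRunsAux_eq_runsB (c : Char) (cs : List Char) :
    pvRunsAux c 1 cs = pvRunsB (c :: cs) := by
  rw [pvL2, pvRunsB]

theorem pvRunsB_pos : ∀ (cs : List Char), ∀ p ∈ pvRunsB cs, 1 ≤ p.2 := by
  intro cs
  induction cs using pvRunsB.induct with
  | case1 => simp [pvRunsB]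
  | case2 c rest ih =>
    intro p hp
    rw [pvRunsB] at hp
    rcases List.mem_cons.mp hp with hp | hp
    · subst hp
      have : (0 : Int) ≤ ((rest.takeWhile (fun d => d == c)).length : Int) := by positivity
      simp
    · exact ih p hp

theorem pvRunsB_le : ∀ (cs : List Char), ∀ p ∈ pvRunsB cs, p.2 ≤ (cs.length : Int) := by
  intro cs
  induction cs using pvRunsB.induct with
  | case1 => simp [pvRunsB]
  | case2 c rest ih =>
    intro p hp
    rw [pvRunsB] at hp
    have hd : (rest.dropWhile (fun d => d == c)).length ≤ rest.length :=
      List.length_dropWhile_le _ _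
    rcases List.mem_cons.mp hp with hp | hp
    · subst hp
      have ht : (rest.takeWhile (fun d => d == c)).length ≤ rest.length :=
        (List.takeWhile_sublist _).length_le
      simp
      omega
    · have := ih p hp
      simp only [List.length_cons]
      push_cast
      omega

theorem pvL3 (min_run_length : Int) :
    ∀ (rs : List (String × Int)) (b : Option (String × Int)),
      (∀ p ∈ rs, 1 ≤ p.2) →
      pvBest min_run_length rs (pvUnb b) =
        pvUnb ((rs.filter (fun p => decide (min_run_length ≤ p.2))).foldl
          (fun acc x =>
            match acc with
            | none => some x
            | some m => if m.2 < x.2 then some x else some m) b) := by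
  intro rs
  induction rs with
  | nil => intro b _; simp [pvBest]
  | cons p rest ih =>
    intro b hpos
    have hp1 : 1 ≤ p.2 := hpos p (by simp)
    have hrest : ∀ q ∈ rest, 1 ≤ q.2 := fun q hq => hpos q (by simp [hq])
    by_cases hm : min_run_length ≤ p.2
    · cases b with
      | none =>
        have hc : min_run_length ≤ p.2 ∧ (pvUnb (none : Option (String × Int))).2 < p.2 := by
          constructor
          · exact hm
          · simp [pvUnb]; omega
        have : pvBest min_run_length (p :: rest) (pvUnb none) =
            pvBest min_run_length rest (pvUnb (some p)) := by
          simp only [pvBest, List.foldl_cons, if_pos hc]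
          rfl
        rw [this, ih (some p) hrest]
        simp [hm]
      | some m =>
        by_cases hlt : m.2 < p.2
        · have : pvBest min_run_length (p :: rest) (pvUnb (some m)) =
              pvBest min_run_length rest (pvUnb (some p)) := by
            simp [pvBest, pvUnb, hm, hlt, List.foldl_cons]
          rw [this, ih (some p) hrest]
          simp [hm, hlt]
        · have : pvBest min_run_length (p :: rest) (pvUnb (some m)) =
              pvBest min_run_length rest (pvUnb (some m)) := by
            simp only [pvBest, pvUnb, List.foldl_cons]
            rw [if_neg (fun hh => hlt hh.2)]
          rw [this, ih (some m) hrest]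
          simp [hm, hlt]
    · have : pvBest min_run_length (p :: rest) (pvUnb b) =
          pvBest min_run_length rest (pvUnb b) := by
        simp [pvBest, List.foldl_cons, hm]
      rw [this, ih b hrest]
      simp [hm]

theorem pvPost_unb (b : Option (String × Int)) :
    (match (pvUnb b).1 with
     | none => ((none : Option String), (0 : Int))
     | some s => (some s, (pvUnb b).2)) = pvUnb b := by
  cases b <;> rfl

theorem pvMax_eq (rs : List (String × Int)) :
    PySem.List.max? rs (fun p => p.2) =
      rs.foldl (fun acc x =>
        match acc with
        | none => some x
        | some m => if m.2 < x.2 then some x else some m) none := by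
  unfold PySem.List.max?
  apply List.foldl_ext
  intro acc x _
  cases acc <;> rfl

theorem pvAlt_eq (text : String) (min_run_length : Int) :
    check_long_runs_alt text min_run_length =
      pvUnb (PySem.List.max?
        ((pvRunsB text.toList).filter (fun p => decide (min_run_length ≤ p.2)))
        (fun p => p.2)) := by
  unfold check_long_runs_alt
  cases h : PySem.List.max?
      ((pvRunsB text.toList).filter (fun p => decide (min_run_length ≤ p.2)))
      (fun p => p.2) with
  | none => simp [h, pvUnb]
  | some p => simp [h, pvUnb]

-- ===== VERDICT (by name: the statement is the Claim_ definition above) =====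
theorem check_long_runs_spec : Claim_equal_check_long_runs := by
  intro text min_run_length _
  unfold Spec_check_long_runs
  rw [pvAlt_eq]
  unfold check_long_runs
  by_cases hg : text = "" ∨ (text.length : Int) < min_run_length
  · rw [if_pos hg]
    rcases hg with hg | hg
    · subst hg
      simp [pvRunsB, PySem.List.max?, pvUnb]
    · have hfilt : (pvRunsB text.toList).filter (fun p => decide (min_run_length ≤ p.2)) = [] := by
        rw [List.filter_eq_nil_iff]
        intro p hp
        have h1 := pvRunsB_le text.toList p hp
        have h2 : (text.toList.length : Int) = (text.length : Int) := by
          rw [String.length_toList]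
        simp only [decide_eq_true_eq]
        omega
      rw [hfilt]
      simp [PySem.List.max?, pvUnb]
  · rw [if_neg hg]
    push_neg at hg
    obtain ⟨hne, _⟩ := hg
    have hlist : text.toList ≠ [] := fun h => hne (String.toList_eq_nil_iff.mp h)
    obtain ⟨c, cs, hcs⟩ := List.exists_cons_of_ne_nil hlist
    rw [hcs]
    have hstep : pvStepA min_run_length (none, 0, none, 0) c = (some c, 1, none, 0) := by
      simp [pvStepA]
    rw [List.foldl_cons, hstep]
    have hA : (match cs.foldl (pvStepA min_run_length) (some c, 1, none, 0) with
        | (cc, cr, lc, ll) =>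
          let fin := if min_run_length ≤ cr ∧ ll < cr then (cc, cr) else (lc, ll)
          match fin.1 with
          | none => ((none : Option String), (0 : Int))
          | some c => (some (String.mk [c]), fin.2)) =
        (match (pvFin min_run_length (cs.foldl (pvStepA min_run_length) (some c, 1, none, 0))).1 with
         | none => ((none : Option String), (0 : Int))
         | some s => (some s, (pvFin min_run_length (cs.foldl (pvStepA min_run_length) (some c, 1, none, 0))).2)) := by
      rcases cs.foldl (pvStepA min_run_length) (some c, 1, none, 0) with ⟨cc, cr, lc, ll⟩
      by_cases h : min_run_length ≤ cr ∧ ll < cr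
      · cases cc <;> simp [pvFin, h]
      · cases lc <;> simp [pvFin, h]
    rw [hA, pvL1]
    have hinit : ((Option.map (fun c => String.mk [c]) (none : Option Char)), (0 : Int)) =
        pvUnb none := rfl
    rw [hinit, pvRunsAux_eq_runsB, pvL3 min_run_length _ none (pvRunsB_pos (c :: cs))]
    rw [pvPost_unb, pvMax_eq]
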